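-- pv_equiv track=rewrite | github.com/jjoshua2/arc_agi | dupes/multi_group-017/train_only/902.py | check_vertical_painted_bottom
-- ===== SOURCE A (Python) =====
-- def check_vertical_painted_bottom(grid):
--     rows = len(grid)
--     cols = len(grid[0])
--     n_half = rows // 2
--     mismatches = []
--     for r in range(n_half):
--         b = rows - 1 - r
--         for c in range(cols):
--             if grid[r][c] != grid[b][c]:
--                 mismatches.append((b, c))
--     if not mismatches:
--         return None
--     colors = set(grid[p[0]][p[1]] for p in mismatches)
--     if len(colors) != 1:
--         return None
--     min_b = min(p[0] for p in mismatches)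
--     max_b = max(p[0] for p in mismatches)
--     min_c = min(p[1] for p in mismatches)
--     max_c = max(p[1] for p in mismatches)
--     h = max_b - min_b + 1
--     w = max_c - min_c + 1
--     if len(mismatches) != h * w:
--         return None
--     output = []
--     for i in range(h):
--         b = min_b + i
--         top_r = rows - 1 - b
--         row = [grid[top_r][min_c + j] for j in range(w)]
--         output.append(row)
--     return output
-- ===== SOURCE B (Python) =====
-- def check_vertical_painted_bottom(grid):
--     rows = len(grid)
--     cols = len(grid[0])
--     half = rows // 2
--     # per top row r: the (sorted) list of columns where the row disagrees with its mirror
--     row_cols = [[c for c in range(cols) if grid[r][c] != grid[rows - 1 - r][c]]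
--                 for r in range(half)]
--     active = [r for r in range(half) if row_cols[r]]
--     if not active:
--         return None
--     colors = {grid[rows - 1 - r][c] for r in active for c in row_cols[r]}
--     if len(colors) != 1:
--         return None
--     min_c = min(row_cols[r][0] for r in active)
--     max_c = max(row_cols[r][-1] for r in active)
--     full = list(range(min_c, max_c + 1))
--     # mismatching rows must be consecutive and each must be wrong on exactly the full span
--     if active != list(range(active[0], active[-1] + 1)):
--         return None
--     if any(row_cols[r] != full for r in active):
--         return None
--     return [grid[r][min_c:max_c + 1] for r in reversed(active)]
-- ===== Notes on version B (the rewrite author's own statement) =====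
-- stated objective: alternative
-- what changed: B never builds the flat (b,c) mismatch list A reasons about: it summarises each mirrored row independently as its sorted list of mismatch columns, then decides validity by interval reasoning (the mismatching rows must be consecutive and every such row's column list must equal the common full span), replacing A's global bounding-box len==h*w counting trick, and emits the answer by slicing the top rows.
import Mathlib
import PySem

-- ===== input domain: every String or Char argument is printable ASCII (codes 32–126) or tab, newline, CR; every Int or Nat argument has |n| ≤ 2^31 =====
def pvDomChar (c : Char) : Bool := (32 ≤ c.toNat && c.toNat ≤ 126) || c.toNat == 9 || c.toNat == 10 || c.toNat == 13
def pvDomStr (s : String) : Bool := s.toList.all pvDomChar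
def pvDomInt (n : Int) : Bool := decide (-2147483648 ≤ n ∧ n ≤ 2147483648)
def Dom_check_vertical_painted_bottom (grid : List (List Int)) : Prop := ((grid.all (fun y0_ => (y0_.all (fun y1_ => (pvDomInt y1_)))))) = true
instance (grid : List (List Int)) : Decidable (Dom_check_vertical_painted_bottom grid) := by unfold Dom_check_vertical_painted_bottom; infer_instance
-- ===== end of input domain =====

-- B summarises each mirrored row as its sorted mismatch-column list and decides validity by
-- interval reasoning (consecutive rows, each equal to the full span) instead of A's flat
-- coordinate list with the len == h*w bounding-box counting trick; same return value everywhere.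
-- ===== PORT A =====
def check_vertical_painted_bottom (grid : List (List Int)) : Option (List (List Int)) :=
  let rows : Int := PySem.List.len grid
  let cols : Int := PySem.List.len (PySem.List.pyGetD grid 0 [])
  let n_half : Int := PySem.Int.floordiv rows 2
  let mismatches : List (Int × Int) :=
    (PySem.List.pyRange 0 n_half 1).foldl (fun acc r =>
      let b := rows - 1 - r
      (PySem.List.pyRange 0 cols 1).foldl (fun acc c =>
        if PySem.List.pyGetD (PySem.List.pyGetD grid r []) c 0 ≠
           PySem.List.pyGetD (PySem.List.pyGetD grid b []) c 0
        then acc ++ [(b, c)] else acc) acc) []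
  if mismatches = [] then none else
  let colors : PySem.Set Int :=
    PySem.Set.ofList (mismatches.map (fun p =>
      PySem.List.pyGetD (PySem.List.pyGetD grid p.1 []) p.2 0))
  if PySem.Set.len colors ≠ 1 then none else
  -- min/max of a nonempty list; .getD 0 is never used (guarded by mismatches ≠ [])
  let min_b : Int := (PySem.List.min? (mismatches.map (fun p => p.1)) (fun x => x)).getD 0
  let max_b : Int := (PySem.List.max? (mismatches.map (fun p => p.1)) (fun x => x)).getD 0
  let min_c : Int := (PySem.List.min? (mismatches.map (fun p => p.2)) (fun x => x)).getD 0
  let max_c : Int := (PySem.List.max? (mismatches.map (fun p => p.2)) (fun x => x)).getD 0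
  let h : Int := max_b - min_b + 1
  let w : Int := max_c - min_c + 1
  if PySem.List.len mismatches ≠ h * w then none else
  some ((PySem.List.pyRange 0 h 1).foldl (fun output i =>
    let b := min_b + i
    let top_r := rows - 1 - b
    let row := (PySem.List.pyRange 0 w 1).map (fun j =>
      PySem.List.pyGetD (PySem.List.pyGetD grid top_r []) (min_c + j) 0)
    output ++ [row]) [])

-- ===== PORT B =====
def check_vertical_painted_bottom_alt (grid : List (List Int)) : Option (List (List Int)) :=
  let rows : Int := PySem.List.len grid
  let cols : Int := PySem.List.len (PySem.List.pyGetD grid 0 [])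
  let half : Int := PySem.Int.floordiv rows 2
  let row_cols : List (List Int) :=
    (PySem.List.pyRange 0 half 1).map (fun r =>
      (PySem.List.pyRange 0 cols 1).filter (fun c =>
        PySem.List.pyGetD (PySem.List.pyGetD grid r []) c 0 !=
        PySem.List.pyGetD (PySem.List.pyGetD grid (rows - 1 - r) []) c 0))
  let active : List Int :=
    (PySem.List.pyRange 0 half 1).filter (fun r =>
      PySem.List.pyGetD row_cols r [] != [])
  if active = [] then none else
  let colors : PySem.Set Int :=
    PySem.Set.ofList (active.flatMap (fun r =>
      (PySem.List.pyGetD row_cols r []).map (fun c =>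
        PySem.List.pyGetD (PySem.List.pyGetD grid (rows - 1 - r) []) c 0)))
  if PySem.Set.len colors ≠ 1 then none else
  -- min/max of a nonempty list; .getD 0 is never used (guarded by active ≠ [])
  let min_c : Int := (PySem.List.min? (active.map (fun r =>
      PySem.List.pyGetD (PySem.List.pyGetD row_cols r []) 0 0)) (fun x => x)).getD 0
  let max_c : Int := (PySem.List.max? (active.map (fun r =>
      PySem.List.pyGetD (PySem.List.pyGetD row_cols r []) (-1) 0)) (fun x => x)).getD 0
  let full : List Int := PySem.List.pyRange min_c (max_c + 1) 1
  if active ≠ PySem.List.pyRange (PySem.List.pyGetD active 0 0)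
      (PySem.List.pyGetD active (-1) 0 + 1) 1 then none else
  if active.any (fun r => PySem.List.pyGetD row_cols r [] != full) then none else
  some (active.reverse.map (fun r =>
    PySem.List.slice (PySem.List.pyGetD grid r []) (some min_c) (some (max_c + 1))))

-- ===== PRECONDITION & SPEC =====
-- Pre_: exactly the inputs where Python A raises no IndexError: the grid is nonempty and every
-- row the mirror scan touches (top half and its mirror image; row 0 defines cols) is at least cols long.
def Pre_check_vertical_painted_bottom (grid : List (List Int)) : Prop :=
  grid ≠ [] ∧ ∀ i : Nat, i < grid.length →
    (i < grid.length / 2 ∨ grid.length - grid.length / 2 ≤ i) →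
    (grid.headD []).length ≤ (grid.getD i []).length
instance (grid : List (List Int)) : Decidable (Pre_check_vertical_painted_bottom grid) := by
  unfold Pre_check_vertical_painted_bottom; infer_instance
def pvWitness_check_vertical_painted_bottom : List (List Int) := [[1, 2], [3, 2]]
def Spec_check_vertical_painted_bottom (grid : List (List Int)) (out : Option (List (List Int))) : Prop := out = check_vertical_painted_bottom_alt grid
instance (grid : List (List Int)) (out : Option (List (List Int))) : Decidable (Spec_check_vertical_painted_bottom grid out) := by unfold Spec_check_vertical_painted_bottom; infer_instance

-- ===== CLAIM (what is proved, stated in full; the proofs are below) =====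
def Claim_equal_check_vertical_painted_bottom : Prop := ∀ (grid : List (List Int)), Dom_check_vertical_painted_bottom grid → Pre_check_vertical_painted_bottom grid → Spec_check_vertical_painted_bottom grid (check_vertical_painted_bottom grid)

-- ===== LEMMAS AND PROOFS =====

-- the mismatch columns of top row r (compared with its mirror row), in increasing order
def pvMc (grid : List (List Int)) (r : Nat) : List Nat :=
  (List.range (grid.getD 0 []).length).filter
    (fun c => decide ((grid.getD r []).getD c 0 ≠ (grid.getD (grid.length - 1 - r) []).getD c 0))

def pvRow (grid : List (List Int)) (r : Nat) : List (Int × Int) :=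
  (pvMc grid r).map (fun c : Nat => (((grid.length - 1 - r : Nat) : Int), (c : Int)))

-- A's flat mismatch list
def pvM (grid : List (List Int)) : List (Int × Int) :=
  (List.range (grid.length / 2)).flatMap (pvRow grid)

-- the top rows that have some mismatch
def pvAct (grid : List (List Int)) : List Nat :=
  (List.range (grid.length / 2)).filter (fun r => decide (pvMc grid r ≠ []))

-- A's mismatch list in top-row/column (Nat) coordinates
def pvMN (grid : List (List Int)) : List (Nat × Nat) :=
  (List.range (grid.length / 2)).flatMap (fun r => (pvMc grid r).map (fun c => (r, c)))

lemma pv_foldl_ite_append {α β : Type} (P : α → Prop) [DecidablePred P] (f : α → β) :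
    ∀ (l : List α) (acc : List β),
    l.foldl (fun acc x => if P x then acc ++ [f x] else acc) acc
      = acc ++ (l.filter (fun x => decide (P x))).map f := by
  intro l
  induction l with
  | nil => intro acc; simp
  | cons hd tl ih =>
    intro acc
    by_cases h : P hd
    · simp [List.foldl_cons, h, ih]
    · simp [List.foldl_cons, h, ih]

lemma pv_inner_clean (grid : List (List Int)) (r : Nat) (hr : r < grid.length) :
    ∀ acc : List (Int × Int),
    (PySem.List.pyRange 0 ((grid.getD 0 []).length : Int) 1).foldl
      (fun acc c =>
        if PySem.List.pyGetD (PySem.List.pyGetD grid ((r : Nat) : Int) []) c 0 ≠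
           PySem.List.pyGetD (PySem.List.pyGetD grid ((grid.length : Int) - 1 - ((r : Nat) : Int)) []) c 0
        then acc ++ [(((grid.length : Int) - 1 - ((r : Nat) : Int)), c)] else acc) acc
    = acc ++ pvRow grid r := by
  intro acc
  have hb : ((grid.length : Int) - 1 - ((r : Nat) : Int)) = ((grid.length - 1 - r : Nat) : Int) := by
    omega
  rw [PySem.List.pyRange_zero_natCast ((grid.getD 0 []).length), List.foldl_map]
  simp only [hb, PySem.List.pyGetD_natCast]
  rw [pv_foldl_ite_append
      (P := fun c : Nat => (grid.getD r []).getD c 0 ≠ (grid.getD (grid.length - 1 - r) []).getD c 0)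
      (f := fun c : Nat => (((grid.length - 1 - r : Nat) : Int), (c : Int)))]
  rfl

lemma pv_foldA (grid : List (List Int)) :
    (PySem.List.pyRange 0 (PySem.Int.floordiv (grid.length : Int) 2) 1).foldl
      (fun acc r =>
        (PySem.List.pyRange 0 ((grid.getD 0 []).length : Int) 1).foldl
          (fun acc c =>
            if PySem.List.pyGetD (PySem.List.pyGetD grid r []) c 0 ≠
               PySem.List.pyGetD (PySem.List.pyGetD grid ((grid.length : Int) - 1 - r) []) c 0
            then acc ++ [(((grid.length : Int) - 1 - r), c)] else acc) acc) []
    = pvM grid := by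
  have hfd : PySem.Int.floordiv (grid.length : Int) 2 = ((grid.length / 2 : Nat) : Int) := by
    exact_mod_cast PySem.Int.floordiv_natCast grid.length 2
  rw [hfd, PySem.List.pyRange_zero_natCast (grid.length / 2), List.foldl_map]
  refine Eq.trans (PySem.List.foldl_congr_mem _ _ (fun acc r => acc ++ pvRow grid r) _ ?_) ?_
  · intro acc r hrmem
    have hr : r < grid.length := by
      have := List.mem_range.mp hrmem; omega
    exact pv_inner_clean grid r hr acc
  · rw [PySem.List.foldl_append_eq_flatMap]
    simp [pvM]

lemma pv_mem_pvAct {grid : List (List Int)} {r : Nat} :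
    r ∈ pvAct grid ↔ r < grid.length / 2 ∧ pvMc grid r ≠ [] := by
  simp [pvAct, List.mem_filter]

lemma pv_mem_pvMN {grid : List (List Int)} {p : Nat × Nat} :
    p ∈ pvMN grid ↔ p.1 < grid.length / 2 ∧ p.2 ∈ pvMc grid p.1 := by
  cases p with
  | mk r c =>
    simp only [pvMN, List.mem_flatMap, List.mem_range, List.mem_map]
    constructor
    · rintro ⟨r', hr', c', hc', h⟩
      obtain ⟨rfl, rfl⟩ : r' = r ∧ c' = c := by
        have h1 := congrArg Prod.fst h
        have h2 := congrArg Prod.snd h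
        exact ⟨h1, h2⟩
      exact ⟨hr', hc'⟩
    · rintro ⟨h1, h2⟩
      exact ⟨r, h1, c, h2, rfl⟩

lemma pv_pvM_eq (grid : List (List Int)) :
    pvM grid = (pvMN grid).map
      (fun p => (((grid.length - 1 - p.1 : Nat) : Int), ((p.2 : Nat) : Int))) := by
  rw [pvM, pvMN, List.map_flatMap]
  refine List.flatMap_congr ?_
  intro r _
  rw [pvRow, List.map_map]
  rfl

lemma pv_pairwise_pvMc (grid : List (List Int)) (r : Nat) :
    (pvMc grid r).Pairwise (· < ·) :=
  List.Pairwise.filter _ List.pairwise_lt_range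

lemma pv_pairwise_pvAct (grid : List (List Int)) :
    (pvAct grid).Pairwise (· < ·) :=
  List.Pairwise.filter _ List.pairwise_lt_range

lemma pv_mc_lt_W {grid : List (List Int)} {r c : Nat} (h : c ∈ pvMc grid r) :
    c < (grid.getD 0 []).length := by
  have := (List.mem_filter.mp h).1
  exact List.mem_range.mp this

lemma pv_sorted_getD_le {l : List Nat} (hp : l.Pairwise (· < ·)) :
    ∀ x ∈ l, l.getD 0 0 ≤ x := by
  intro x hx
  obtain ⟨i, hi, rfl⟩ := List.getElem_of_mem hx
  have h0 : 0 < l.length := by omega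
  rw [List.getD_eq_getElem l 0 h0]
  rcases Nat.eq_zero_or_pos i with rfl | hpos
  · exact le_rfl
  · exact le_of_lt ((List.pairwise_iff_getElem.mp hp) 0 i h0 hi hpos)

lemma pv_sorted_le_getDlast {l : List Nat} (hp : l.Pairwise (· < ·)) :
    ∀ x ∈ l, x ≤ l.getD (l.length - 1) 0 := by
  intro x hx
  obtain ⟨i, hi, rfl⟩ := List.getElem_of_mem hx
  have hl : l.length - 1 < l.length := by omega
  rw [List.getD_eq_getElem l 0 hl]
  by_cases h : i = l.length - 1
  · subst h; exact le_rfl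
  · exact le_of_lt ((List.pairwise_iff_getElem.mp hp) i (l.length - 1) hi hl (by omega))

lemma pv_sorted_ext {l₁ l₂ : List Nat} (h1 : l₁.Pairwise (· < ·)) (h2 : l₂.Pairwise (· < ·))
    (h : ∀ x, x ∈ l₁ ↔ x ∈ l₂) : l₁ = l₂ := by
  have hp := (List.perm_ext_iff_of_nodup (h1.imp Nat.ne_of_lt) (h2.imp Nat.ne_of_lt)).mpr h
  exact hp.eq_of_pairwise (fun a b _ _ hab hba => by omega) h1 h2

lemma pv_flatMap_filter {α β : Type} (p : α → Bool) (f : α → List β) :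
    ∀ l : List α, (∀ x ∈ l, p x = false → f x = []) → (l.filter p).flatMap f = l.flatMap f := by
  intro l
  induction l with
  | nil => intro _; rfl
  | cons hd tl ih =>
    intro h
    by_cases hp : p hd
    · rw [List.filter_cons_of_pos hp, List.flatMap_cons, List.flatMap_cons,
        ih (fun x hx => h x (List.mem_cons_of_mem _ hx))]
    · rw [List.filter_cons_of_neg (by simpa using hp), List.flatMap_cons,
        h hd (by simp) (by simpa using hp), List.nil_append,
        ih (fun x hx => h x (List.mem_cons_of_mem _ hx))]

lemma pv_pvMN_nodup (grid : List (List Int)) : (pvMN grid).Nodup := by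
  rw [pvMN, List.nodup_flatMap]
  constructor
  · intro r _
    exact List.Nodup.map (fun a b hab => congrArg Prod.snd hab)
      ((pv_pairwise_pvMc grid r).imp Nat.ne_of_lt)
  · refine List.pairwise_lt_range.imp ?_
    intro r r' hlt q hq hq'
    simp only [List.mem_map] at hq hq'
    obtain ⟨c, _, rfl⟩ := hq
    obtain ⟨c', _, h⟩ := hq'
    have := congrArg Prod.fst h
    simp only at this
    omega

lemma pv_pyGetD_last {α : Type} (xs : List α) (d : α) :
    PySem.List.pyGetD xs (-1) d = xs.getD (xs.length - 1) d := by
  cases xs with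
  | nil => rfl
  | cons hd tl =>
    rw [PySem.List.pyGetD_neg_one (hd :: tl) d (by simp),
      List.getLast_eq_getElem, List.getD_eq_getElem]

lemma pv_pyRange_natCast (a b : Nat) :
    PySem.List.pyRange (a : Int) (b : Int) 1
      = (List.range' a (b - a)).map (fun k : Nat => (k : Int)) := by
  rw [PySem.List.pyRange_one, List.range'_eq_map_range, List.map_map]
  have harith : ((b : Int) - (a : Int)).toNat = b - a := by omega
  rw [harith]
  refine List.map_congr_left ?_
  intro k _
  simp

-- the counting trick: |MN| = h*w  iff  MN covers the whole bounding rectangle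
lemma pv_count_iff (grid : List (List Int)) (rmin rmax cmin cmax : Nat)
    (hrr : rmin ≤ rmax) (hcc : cmin ≤ cmax)
    (hsub : ∀ p ∈ pvMN grid, rmin ≤ p.1 ∧ p.1 ≤ rmax ∧ cmin ≤ p.2 ∧ p.2 ≤ cmax) :
    ((pvMN grid).length = (rmax + 1 - rmin) * (cmax + 1 - cmin)) ↔
      (∀ r c, rmin ≤ r → r ≤ rmax → cmin ≤ c → c ≤ cmax → (r, c) ∈ pvMN grid) := by
  set box : List (Nat × Nat) := (List.range' rmin (rmax + 1 - rmin)).flatMap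
      (fun r => (List.range' cmin (cmax + 1 - cmin)).map (fun c => (r, c))) with hbox
  have hmem_box : ∀ q : Nat × Nat,
      q ∈ box ↔ rmin ≤ q.1 ∧ q.1 ≤ rmax ∧ cmin ≤ q.2 ∧ q.2 ≤ cmax := by
    intro q
    rw [hbox]
    simp only [List.mem_flatMap, List.mem_map, List.mem_range'_1]
    constructor
    · rintro ⟨r, hr, c, hc, rfl⟩
      exact ⟨hr.1, by omega, hc.1, by omega⟩
    · rintro ⟨h1, h2, h3, h4⟩
      exact ⟨q.1, ⟨h1, by omega⟩, q.2, ⟨h3, by omega⟩, rfl⟩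
  have hnd_box : box.Nodup := by
    rw [hbox, List.nodup_flatMap]
    constructor
    · intro r _
      exact List.Nodup.map (fun a b hab => congrArg Prod.snd hab)
        ((List.pairwise_lt_range' 1).imp Nat.ne_of_lt)
    · refine (List.pairwise_lt_range' 1).imp ?_
      intro r r' hlt q hq hq'
      simp only [List.mem_map] at hq hq'
      obtain ⟨c, _, rfl⟩ := hq
      obtain ⟨c', _, h⟩ := hq'
      have := congrArg Prod.fst h
      simp only at this
      omega
  have hlen_box : box.length = (rmax + 1 - rmin) * (cmax + 1 - cmin) := by
    rw [hbox, List.length_flatMap]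
    simp only [List.length_map, List.length_range']
    rw [List.map_const', List.sum_replicate, smul_eq_mul, List.length_range']
  have hMNsub : pvMN grid ⊆ box := by
    intro p hp
    obtain ⟨h1, h2, h3, h4⟩ := hsub p hp
    exact (hmem_box p).mpr ⟨h1, h2, h3, h4⟩
  constructor
  · intro hl r c h1 h2 h3 h4
    have hsp := List.subperm_of_subset (pv_pvMN_nodup grid) hMNsub
    have hperm := hsp.perm_of_length_le (by omega)
    exact hperm.mem_iff.mpr ((hmem_box (r, c)).mpr ⟨h1, h2, h3, h4⟩)
  · intro hfill
    have hperm : (pvMN grid).Perm box :=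
      (List.perm_ext_iff_of_nodup (pv_pvMN_nodup grid) hnd_box).mpr
        (fun q => ⟨fun h => hMNsub h, fun h => by
          obtain ⟨h1, h2, h3, h4⟩ := (hmem_box q).mp h
          have := hfill q.1 q.2 h1 h2 h3 h4
          simpa using this⟩)
    rw [hperm.length_eq, hlen_box]

-- full rectangle coverage  iff  B's interval conditions
lemma pv_fill_iff (grid : List (List Int)) (hne : pvAct grid ≠ []) (cmin cmax : Nat)
    (hcc : cmin ≤ cmax)
    (hcol : ∀ p ∈ pvMN grid, cmin ≤ p.2 ∧ p.2 ≤ cmax) :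
    (∀ r c, (pvAct grid).getD 0 0 ≤ r → r ≤ (pvAct grid).getD ((pvAct grid).length - 1) 0 →
        cmin ≤ c → c ≤ cmax → (r, c) ∈ pvMN grid) ↔
      (pvAct grid = List.range' ((pvAct grid).getD 0 0)
          ((pvAct grid).getD ((pvAct grid).length - 1) 0 + 1 - (pvAct grid).getD 0 0) ∧
        ∀ r ∈ pvAct grid, pvMc grid r = List.range' cmin (cmax + 1 - cmin)) := by
  set rmin := (pvAct grid).getD 0 0 with hrmin
  set rmax := (pvAct grid).getD ((pvAct grid).length - 1) 0 with hrmax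
  have hrmin_mem : rmin ∈ pvAct grid := by
    rw [hrmin, List.getD_eq_getElem _ _ (by
      have := List.length_pos_iff.mpr hne; omega)]
    exact List.getElem_mem _
  have hrmax_mem : rmax ∈ pvAct grid := by
    rw [hrmax, List.getD_eq_getElem _ _ (by
      have := List.length_pos_iff.mpr hne; omega)]
    exact List.getElem_mem _
  have hlo : ∀ r ∈ pvAct grid, rmin ≤ r := pv_sorted_getD_le (pv_pairwise_pvAct grid)
  have hhi : ∀ r ∈ pvAct grid, r ≤ rmax := pv_sorted_le_getDlast (pv_pairwise_pvAct grid)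
  have hrr : rmin ≤ rmax := hlo rmax hrmax_mem
  constructor
  · intro hfill
    constructor
    · refine pv_sorted_ext (pv_pairwise_pvAct grid) (List.pairwise_lt_range' 1) ?_
      intro r
      rw [List.mem_range'_1]
      constructor
      · intro hr
        exact ⟨hlo r hr, by have := hhi r hr; omega⟩
      · rintro ⟨h1, h2⟩
        have hmem := hfill r cmin h1 (by omega) le_rfl hcc
        have := pv_mem_pvMN.mp hmem
        exact pv_mem_pvAct.mpr ⟨this.1, by intro hnil; rw [hnil] at this; exact absurd this.2 (by simp)⟩
    · intro r hr
      refine pv_sorted_ext (pv_pairwise_pvMc grid r) (List.pairwise_lt_range' 1) ?_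
      intro c
      rw [List.mem_range'_1]
      constructor
      · intro hc
        have hmem : (r, c) ∈ pvMN grid :=
          pv_mem_pvMN.mpr ⟨(pv_mem_pvAct.mp hr).1, hc⟩
        have := hcol _ hmem
        exact ⟨this.1, by have := this.2; omega⟩
      · rintro ⟨h1, h2⟩
        have hmem := hfill r c (hlo r hr) (hhi r hr) h1 (by omega)
        exact (pv_mem_pvMN.mp hmem).2
  · rintro ⟨hact, hfullrow⟩ r c h1 h2 h3 h4
    have hr : r ∈ pvAct grid := by
      rw [hact, List.mem_range'_1]
      exact ⟨h1, by omega⟩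
    have hmc := hfullrow r hr
    refine pv_mem_pvMN.mpr ⟨(pv_mem_pvAct.mp hr).1, ?_⟩
    rw [hmc, List.mem_range'_1]
    exact ⟨h3, by omega⟩

lemma pv_bne_int (a b : Int) : (a != b) = decide (¬ a = b) := by
  by_cases h : a = b <;> simp [h]

lemma pv_bne_list (xs ys : List Int) : (xs != ys) = decide (¬ xs = ys) := by
  by_cases h : xs = ys <;> simp [h]

lemma pv_take_drop_eq_map (row : List Int) (a w : Nat) (hw : a + w ≤ row.length) :
    (row.drop a).take w = (List.range w).map (fun j => row.getD (a + j) 0) := by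
  refine List.ext_getElem ?_ ?_
  · simp
    omega
  · intro j h1 h2
    simp only [List.getElem_take, List.getElem_drop, List.getElem_map, List.getElem_range]
    rw [List.getD_eq_getElem row 0 (by
      simp only [List.length_take, List.length_drop] at h1
      omega)]

theorem pv_main (grid : List (List Int))
    (hpre : Pre_check_vertical_painted_bottom grid) :
    check_vertical_painted_bottom grid = check_vertical_painted_bottom_alt grid := by
  obtain ⟨hgne, hrows⟩ := hpre
  have hhead : grid.headD [] = grid.getD 0 [] := by
    cases grid with
    | nil => exact absurd rfl hgne
    | cons a t => rfl
  simp only [check_vertical_painted_bottom, check_vertical_painted_bottom_alt,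
    PySem.List.len_eq, PySem.List.pyGetD_zero]
  rw [pv_foldA grid]
  have hhalf : PySem.Int.floordiv ((grid.length : Int)) 2 = ((grid.length / 2 : Nat) : Int) := by
    exact_mod_cast PySem.Int.floordiv_natCast grid.length 2
  rw [hhalf]
  -- B's row_cols reduces to the per-row mismatch-column lists
  have hRC : ((PySem.List.pyRange 0 ((grid.length / 2 : Nat) : Int) 1).map (fun r =>
      (PySem.List.pyRange 0 (((grid.getD 0 []).length : Nat) : Int) 1).filter (fun c =>
        PySem.List.pyGetD (PySem.List.pyGetD grid r []) c 0 !=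
        PySem.List.pyGetD (PySem.List.pyGetD grid ((grid.length : Int) - 1 - r) []) c 0)))
      = (List.range (grid.length / 2)).map (fun r => (pvMc grid r).map (fun c : Nat => (c : Int))) := by
    rw [PySem.List.pyRange_zero_natCast (grid.length / 2), List.map_map]
    refine List.map_congr_left ?_
    intro r hr
    have hrn : r < grid.length := by have := List.mem_range.mp hr; omega
    have hb : ((grid.length : Int) - 1 - ((r : Nat) : Int)) = ((grid.length - 1 - r : Nat) : Int) := by
      omega
    simp only [Function.comp_def, hb, PySem.List.pyRange_zero_natCast, List.filter_map,
      PySem.List.pyGetD_natCast, pvMc, pv_bne_int]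
  rw [hRC]
  -- B's active reduces to pvAct
  have hACT : ((PySem.List.pyRange 0 ((grid.length / 2 : Nat) : Int) 1).filter (fun r =>
      PySem.List.pyGetD ((List.range (grid.length / 2)).map
        (fun r => (pvMc grid r).map (fun c : Nat => (c : Int)))) r [] != []))
      = (pvAct grid).map (fun r : Nat => (r : Int)) := by
    rw [PySem.List.pyRange_zero_natCast (grid.length / 2), List.filter_map, pvAct]
    refine congrArg _ (List.filter_congr ?_)
    intro r hr
    have hrlt := List.mem_range.mp hr
    simp only [Function.comp_def, PySem.List.pyGetD_natCast]
    rw [PySem.List.getD_map_range _ _ _ _ hrlt, pv_bne_list]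
    exact decide_eq_decide.mpr (by simp)
  rw [hACT]
  -- A sees a mismatch iff B sees an active row
  have hMA : (pvM grid = []) ↔ (pvAct grid = []) := by
    rw [pvM, List.flatMap_eq_nil_iff, pvAct, List.filter_eq_nil_iff]
    constructor
    · intro h r hr
      have := h r hr
      rw [pvRow, List.map_eq_nil_iff] at this
      simp [this]
    · intro h r hr
      have := h r hr
      rw [pvRow, List.map_eq_nil_iff]
      simpa using this
  by_cases hact : pvAct grid = []
  · rw [if_pos (hMA.mpr hact), if_pos (by simp [hact])]
  · have hMne : pvM grid ≠ [] := fun h => hact (hMA.mp h)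
    have hBne : ¬ ((pvAct grid).map (fun r : Nat => (r : Int)) = []) := by
      simpa [List.map_eq_nil_iff] using hact
    rw [if_neg hMne, if_neg hBne]
    -- both colour lists are the same list
    have hColA : (pvM grid).map (fun p => PySem.List.pyGetD (PySem.List.pyGetD grid p.1 []) p.2 0)
        = (List.range (grid.length / 2)).flatMap (fun r => (pvMc grid r).map (fun c =>
            (grid.getD (grid.length - 1 - r) []).getD c 0)) := by
      rw [pv_pvM_eq, List.map_map, pvMN, List.map_flatMap]
      refine List.flatMap_congr ?_
      intro r _
      rw [List.map_map]
      refine List.map_congr_left ?_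
      intro c _
      simp [Function.comp_def, PySem.List.pyGetD_natCast]
    have hColB : ((pvAct grid).map (fun r : Nat => (r : Int))).flatMap (fun r =>
        (PySem.List.pyGetD ((List.range (grid.length / 2)).map
          (fun r => (pvMc grid r).map (fun c : Nat => (c : Int)))) r []).map (fun c =>
            PySem.List.pyGetD (PySem.List.pyGetD grid ((grid.length : Int) - 1 - r) []) c 0))
        = (List.range (grid.length / 2)).flatMap (fun r => (pvMc grid r).map (fun c =>
            (grid.getD (grid.length - 1 - r) []).getD c 0)) := by
      rw [List.flatMap_map, pvAct,
        pv_flatMap_filter _ _ (List.range (grid.length / 2)) ?hside]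
      case hside =>
        intro r hr hfalse
        have hrlt := List.mem_range.mp hr
        have hmc : pvMc grid r = [] := by simpa using hfalse
        rw [PySem.List.pyGetD_natCast, PySem.List.getD_map_range _ _ _ _ hrlt, hmc]
        rfl
      refine List.flatMap_congr ?_
      intro r hr
      have hrlt := List.mem_range.mp hr
      have hrn : r < grid.length := by omega
      have hb : ((grid.length : Int) - 1 - ((r : Nat) : Int))
          = ((grid.length - 1 - r : Nat) : Int) := by omega
      rw [PySem.List.pyGetD_natCast, PySem.List.getD_map_range _ _ _ _ hrlt, List.map_map]
      refine List.map_congr_left ?_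
      intro c _
      simp [hb, PySem.List.pyGetD_natCast]
    rw [hColA, hColB]
    by_cases hcol : PySem.Set.len (PySem.Set.ofList ((List.range (grid.length / 2)).flatMap
        (fun r => (pvMc grid r).map (fun c => (grid.getD (grid.length - 1 - r) []).getD c 0)))) ≠ 1
    · rw [if_pos hcol, if_pos hcol]
    · rw [if_neg hcol, if_neg hcol]
      -- notation: n = grid.length, rminN/rmaxN = first/last active top row,
      -- cminN/cmaxN = least/greatest mismatch column
      have hn : 0 < grid.length := List.length_pos_iff.mpr hgne
      have hlenpos : 0 < (pvAct grid).length := List.length_pos_iff.mpr hact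
      have hrmin_mem : (pvAct grid).getD 0 0 ∈ pvAct grid := by
        rw [List.getD_eq_getElem _ _ hlenpos]; exact List.getElem_mem _
      have hrmax_mem : (pvAct grid).getD ((pvAct grid).length - 1) 0 ∈ pvAct grid := by
        rw [List.getD_eq_getElem _ _ (by omega)]; exact List.getElem_mem _
      have hlo := pv_sorted_getD_le (pv_pairwise_pvAct grid)
      have hhi := pv_sorted_le_getDlast (pv_pairwise_pvAct grid)
      have hrmm : (pvAct grid).getD 0 0 ≤ (pvAct grid).getD ((pvAct grid).length - 1) 0 :=
        hlo _ hrmax_mem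
      have hrmax_lt : (pvAct grid).getD ((pvAct grid).length - 1) 0 < grid.length / 2 :=
        (pv_mem_pvAct.mp hrmax_mem).1
      have hmcq : ∀ r ∈ pvAct grid, (pvMc grid r).getD 0 0 ∈ pvMc grid r := by
        intro r hr
        have : 0 < (pvMc grid r).length := List.length_pos_iff.mpr (pv_mem_pvAct.mp hr).2
        rw [List.getD_eq_getElem _ _ this]; exact List.getElem_mem _
      have hmclastq : ∀ r ∈ pvAct grid,
          (pvMc grid r).getD ((pvMc grid r).length - 1) 0 ∈ pvMc grid r := by
        intro r hr
        have : 0 < (pvMc grid r).length := List.length_pos_iff.mpr (pv_mem_pvAct.mp hr).2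
        rw [List.getD_eq_getElem _ _ (by omega)]; exact List.getElem_mem _
      have hmem_pvM_of : ∀ q ∈ pvMN grid,
          (((grid.length - 1 - q.1 : Nat) : Int), ((q.2 : Nat) : Int)) ∈ pvM grid := by
        intro q hq
        rw [pv_pvM_eq]
        exact List.mem_map_of_mem hq
      have hq_act : ∀ q ∈ pvMN grid, q.1 ∈ pvAct grid := by
        intro q hq
        exact pv_mem_pvAct.mpr ⟨(pv_mem_pvMN.mp hq).1, List.ne_nil_of_mem (pv_mem_pvMN.mp hq).2⟩
      -- A's four extrema
      obtain ⟨minB, hminB⟩ : ∃ v, PySem.List.min? ((pvM grid).map fun p => p.1) (fun x => x) = some v := by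
        cases h : PySem.List.min? ((pvM grid).map fun p => p.1) (fun x => x) with
        | none => exact absurd (List.map_eq_nil_iff.mp ((PySem.List.min?_eq_none_iff _ _).mp h)) hMne
        | some v => exact ⟨v, rfl⟩
      obtain ⟨maxB, hmaxB⟩ : ∃ v, PySem.List.max? ((pvM grid).map fun p => p.1) (fun x => x) = some v := by
        cases h : PySem.List.max? ((pvM grid).map fun p => p.1) (fun x => x) with
        | none => exact absurd (List.map_eq_nil_iff.mp ((PySem.List.max?_eq_none_iff _ _).mp h)) hMne
        | some v => exact ⟨v, rfl⟩
      obtain ⟨minC, hminC⟩ : ∃ v, PySem.List.min? ((pvM grid).map fun p => p.2) (fun x => x) = some v := by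
        cases h : PySem.List.min? ((pvM grid).map fun p => p.2) (fun x => x) with
        | none => exact absurd (List.map_eq_nil_iff.mp ((PySem.List.min?_eq_none_iff _ _).mp h)) hMne
        | some v => exact ⟨v, rfl⟩
      obtain ⟨maxC, hmaxC⟩ : ∃ v, PySem.List.max? ((pvM grid).map fun p => p.2) (fun x => x) = some v := by
        cases h : PySem.List.max? ((pvM grid).map fun p => p.2) (fun x => x) with
        | none => exact absurd (List.map_eq_nil_iff.mp ((PySem.List.max?_eq_none_iff _ _).mp h)) hMne
        | some v => exact ⟨v, rfl⟩
      -- their values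
      have hminB_val : minB = ((grid.length - 1 - (pvAct grid).getD ((pvAct grid).length - 1) 0 : Nat) : Int) := by
        apply le_antisymm
        · have hq : ((pvAct grid).getD ((pvAct grid).length - 1) 0,
              (pvMc grid ((pvAct grid).getD ((pvAct grid).length - 1) 0)).getD 0 0) ∈ pvMN grid :=
            pv_mem_pvMN.mpr ⟨hrmax_lt, hmcq _ hrmax_mem⟩
          exact PySem.List.min?_isMin hminB _ (List.mem_map_of_mem (hmem_pvM_of _ hq))
        · obtain ⟨p, hp, hfst⟩ := List.mem_map.mp (PySem.List.min?_mem hminB)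
          rw [pv_pvM_eq, List.mem_map] at hp
          obtain ⟨q, hq, rfl⟩ := hp
          have h1 := hhi _ (hq_act q hq)
          have h2 := (pv_mem_pvMN.mp hq).1
          rw [← hfst]
          have h3 : grid.length / 2 ≤ grid.length := Nat.div_le_self _ 2
          simp only []
          omega
      have hmaxB_val : maxB = ((grid.length - 1 - (pvAct grid).getD 0 0 : Nat) : Int) := by
        apply le_antisymm
        · obtain ⟨p, hp, hfst⟩ := List.mem_map.mp (PySem.List.max?_mem hmaxB)
          rw [pv_pvM_eq, List.mem_map] at hp
          obtain ⟨q, hq, rfl⟩ := hp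
          have h1 := hlo _ (hq_act q hq)
          have h2 := (pv_mem_pvMN.mp hq).1
          rw [← hfst]
          have h3 : grid.length / 2 ≤ grid.length := Nat.div_le_self _ 2
          have h4 := (pv_mem_pvAct.mp hrmin_mem).1
          simp only []
          omega
        · have hq : ((pvAct grid).getD 0 0,
              (pvMc grid ((pvAct grid).getD 0 0)).getD 0 0) ∈ pvMN grid :=
            pv_mem_pvMN.mpr ⟨(pv_mem_pvAct.mp hrmin_mem).1, hmcq _ hrmin_mem⟩
          exact PySem.List.max?_isMax hmaxB _ (List.mem_map_of_mem (hmem_pvM_of _ hq))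
      obtain ⟨q0, hq0, hq0v⟩ : ∃ q ∈ pvMN grid, minC = ((q.2 : Nat) : Int) := by
        obtain ⟨p, hp, hsnd⟩ := List.mem_map.mp (PySem.List.min?_mem hminC)
        rw [pv_pvM_eq, List.mem_map] at hp
        obtain ⟨q, hq, rfl⟩ := hp
        exact ⟨q, hq, hsnd.symm⟩
      obtain ⟨q1, hq1, hq1v⟩ : ∃ q ∈ pvMN grid, maxC = ((q.2 : Nat) : Int) := by
        obtain ⟨p, hp, hsnd⟩ := List.mem_map.mp (PySem.List.max?_mem hmaxC)
        rw [pv_pvM_eq, List.mem_map] at hp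
        obtain ⟨q, hq, rfl⟩ := hp
        exact ⟨q, hq, hsnd.symm⟩
      have hcmin_le : ∀ q ∈ pvMN grid, q0.2 ≤ q.2 := by
        intro q hq
        have := PySem.List.min?_isMin hminC ((q.2 : Nat) : Int)
          (List.mem_map_of_mem (hmem_pvM_of _ hq))
        rw [hq0v] at this
        exact_mod_cast this
      have hcmax_ge : ∀ q ∈ pvMN grid, q.2 ≤ q1.2 := by
        intro q hq
        have := PySem.List.max?_isMax hmaxC ((q.2 : Nat) : Int)
          (List.mem_map_of_mem (hmem_pvM_of _ hq))
        rw [hq1v] at this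
        exact_mod_cast this
      have hcc : q0.2 ≤ q1.2 := hcmax_ge q0 hq0
      -- B's candidate lists for min/max reduce to per-row head/last columns
      have hLmin : ((pvAct grid).map (fun r : Nat => (r : Int))).map (fun r =>
          (PySem.List.pyGetD ((List.range (grid.length / 2)).map
            (fun r => (pvMc grid r).map (fun c : Nat => (c : Int)))) r []).getD 0 0)
          = (pvAct grid).map (fun r : Nat => (((pvMc grid r).getD 0 0 : Nat) : Int)) := by
        rw [List.map_map]
        refine List.map_congr_left ?_
        intro r hr
        have hrlt : r < grid.length / 2 := (pv_mem_pvAct.mp hr).1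
        simp only [Function.comp_def, PySem.List.pyGetD_natCast]
        rw [PySem.List.getD_map_range _ _ _ _ hrlt]
        simpa using List.getD_map (pvMc grid r) 0 (fun c : Nat => (c : Int)) (n := 0)
      have hLmax : ((pvAct grid).map (fun r : Nat => (r : Int))).map (fun r =>
          PySem.List.pyGetD (PySem.List.pyGetD ((List.range (grid.length / 2)).map
            (fun r => (pvMc grid r).map (fun c : Nat => (c : Int)))) r []) (-1) 0)
          = (pvAct grid).map (fun r : Nat =>
              (((pvMc grid r).getD ((pvMc grid r).length - 1) 0 : Nat) : Int)) := by
        rw [List.map_map]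
        refine List.map_congr_left ?_
        intro r hr
        have hrlt : r < grid.length / 2 := (pv_mem_pvAct.mp hr).1
        simp only [Function.comp_def, PySem.List.pyGetD_natCast]
        rw [PySem.List.getD_map_range _ _ _ _ hrlt, pv_pyGetD_last, List.length_map]
        simpa using List.getD_map (pvMc grid r) 0 (fun c : Nat => (c : Int))
          (n := (pvMc grid r).length - 1)
      rw [hLmin, hLmax]
      obtain ⟨bmin, hbmin⟩ : ∃ v, PySem.List.min?
          ((pvAct grid).map (fun r : Nat => (((pvMc grid r).getD 0 0 : Nat) : Int)))
          (fun x => x) = some v := by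
        cases h : PySem.List.min?
            ((pvAct grid).map (fun r : Nat => (((pvMc grid r).getD 0 0 : Nat) : Int)))
            (fun x => x) with
        | none => exact absurd (List.map_eq_nil_iff.mp ((PySem.List.min?_eq_none_iff _ _).mp h)) hact
        | some v => exact ⟨v, rfl⟩
      obtain ⟨bmax, hbmax⟩ : ∃ v, PySem.List.max?
          ((pvAct grid).map (fun r : Nat =>
            (((pvMc grid r).getD ((pvMc grid r).length - 1) 0 : Nat) : Int)))
          (fun x => x) = some v := by
        cases h : PySem.List.max?
            ((pvAct grid).map (fun r : Nat =>
              (((pvMc grid r).getD ((pvMc grid r).length - 1) 0 : Nat) : Int)))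
            (fun x => x) with
        | none => exact absurd (List.map_eq_nil_iff.mp ((PySem.List.max?_eq_none_iff _ _).mp h)) hact
        | some v => exact ⟨v, rfl⟩
      have hbmin_val : bmin = ((q0.2 : Nat) : Int) := by
        apply le_antisymm
        · have hr0 := hq_act q0 hq0
          have hhd := pv_sorted_getD_le (pv_pairwise_pvMc grid q0.1) _ (pv_mem_pvMN.mp hq0).2
          have := PySem.List.min?_isMin hbmin (((pvMc grid q0.1).getD 0 0 : Nat) : Int)
            (List.mem_map_of_mem hr0)
          calc bmin ≤ (((pvMc grid q0.1).getD 0 0 : Nat) : Int) := this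
            _ ≤ ((q0.2 : Nat) : Int) := by exact_mod_cast hhd
        · obtain ⟨r1, hr1, hval⟩ := List.mem_map.mp (PySem.List.min?_mem hbmin)
          have hqm : (r1, (pvMc grid r1).getD 0 0) ∈ pvMN grid :=
            pv_mem_pvMN.mpr ⟨(pv_mem_pvAct.mp hr1).1, hmcq _ hr1⟩
          have := hcmin_le _ hqm
          rw [← hval]
          exact_mod_cast this
      have hbmax_val : bmax = ((q1.2 : Nat) : Int) := by
        apply le_antisymm
        · obtain ⟨r1, hr1, hval⟩ := List.mem_map.mp (PySem.List.max?_mem hbmax)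
          have hqm : (r1, (pvMc grid r1).getD ((pvMc grid r1).length - 1) 0) ∈ pvMN grid :=
            pv_mem_pvMN.mpr ⟨(pv_mem_pvAct.mp hr1).1, hmclastq _ hr1⟩
          have := hcmax_ge _ hqm
          rw [← hval]
          exact_mod_cast this
        · have hr1 := hq_act q1 hq1
          have hlast := pv_sorted_le_getDlast (pv_pairwise_pvMc grid q1.1) _ (pv_mem_pvMN.mp hq1).2
          have := PySem.List.max?_isMax hbmax
            (((pvMc grid q1.1).getD ((pvMc grid q1.1).length - 1) 0 : Nat) : Int)
            (List.mem_map_of_mem hr1)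
          calc ((q1.2 : Nat) : Int)
              ≤ (((pvMc grid q1.1).getD ((pvMc grid q1.1).length - 1) 0 : Nat) : Int) := by
                exact_mod_cast hlast
            _ ≤ bmax := this
      rw [hminB, hmaxB, hminC, hmaxC, hbmin, hbmax]
      simp only [Option.getD_some]
      rw [hminB_val, hmaxB_val, hq0v, hq1v, hbmin_val, hbmax_val]
      have hcastinj : Function.Injective (List.map (fun k : Nat => (k : Int))) :=
        List.map_injective_iff.mpr (fun a b hab => by exact_mod_cast hab)
      have hIdx0 : ((pvAct grid).map (fun r : Nat => (r : Int))).getD 0 0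
          = (((pvAct grid).getD 0 0 : Nat) : Int) := by
        simpa using List.getD_map (pvAct grid) 0 (fun r : Nat => (r : Int)) (n := 0)
      have hIdxL : PySem.List.pyGetD ((pvAct grid).map (fun r : Nat => (r : Int))) (-1) 0
          = (((pvAct grid).getD ((pvAct grid).length - 1) 0 : Nat) : Int) := by
        rw [pv_pyGetD_last, List.length_map]
        simpa using List.getD_map (pvAct grid) 0 (fun r : Nat => (r : Int))
          (n := (pvAct grid).length - 1)
      rw [hIdx0, hIdxL]
      have hRange1 : PySem.List.pyRange (((pvAct grid).getD 0 0 : Nat) : Int)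
          ((((pvAct grid).getD ((pvAct grid).length - 1) 0 : Nat) : Int) + 1) 1
          = (List.range' ((pvAct grid).getD 0 0)
              ((pvAct grid).getD ((pvAct grid).length - 1) 0 + 1 - (pvAct grid).getD 0 0)).map
              (fun k : Nat => (k : Int)) := by
        rw [show ((((pvAct grid).getD ((pvAct grid).length - 1) 0 : Nat) : Int) + 1)
            = (((pvAct grid).getD ((pvAct grid).length - 1) 0 + 1 : Nat) : Int) by push_cast; ring]
        exact pv_pyRange_natCast _ _
      have hFull : PySem.List.pyRange ((q0.2 : Nat) : Int) (((q1.2 : Nat) : Int) + 1) 1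
          = (List.range' q0.2 (q1.2 + 1 - q0.2)).map (fun k : Nat => (k : Int)) := by
        rw [show (((q1.2 : Nat) : Int) + 1) = ((q1.2 + 1 : Nat) : Int) by push_cast; ring]
        exact pv_pyRange_natCast _ _
      rw [hRange1, hFull]
      have hEq1 : ((grid.length - 1 - (pvAct grid).getD 0 0 : Nat) : Int)
          - ((grid.length - 1 - (pvAct grid).getD ((pvAct grid).length - 1) 0 : Nat) : Int) + 1
          = (((pvAct grid).getD ((pvAct grid).length - 1) 0 + 1 - (pvAct grid).getD 0 0 : Nat) : Int) := by
        have h4 := (pv_mem_pvAct.mp hrmin_mem).1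
        have h3 : grid.length / 2 ≤ grid.length := Nat.div_le_self _ 2
        omega
      have hEq2 : ((q1.2 : Nat) : Int) - ((q0.2 : Nat) : Int) + 1
          = ((q1.2 + 1 - q0.2 : Nat) : Int) := by omega
      rw [hEq1, hEq2]
      have hlenMN : (pvM grid).length = (pvMN grid).length := by
        rw [pv_pvM_eq, List.length_map]
      rw [hlenMN]
      have hsub : ∀ p ∈ pvMN grid, (pvAct grid).getD 0 0 ≤ p.1 ∧
          p.1 ≤ (pvAct grid).getD ((pvAct grid).length - 1) 0 ∧ q0.2 ≤ p.2 ∧ p.2 ≤ q1.2 := by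
        intro p hp
        exact ⟨hlo _ (hq_act p hp), hhi _ (hq_act p hp), hcmin_le p hp, hcmax_ge p hp⟩
      have hCF := pv_count_iff grid _ _ _ _ hrmm hcc hsub
      have hFI := pv_fill_iff grid hact q0.2 q1.2 hcc (fun p hp => ⟨hcmin_le p hp, hcmax_ge p hp⟩)
      have hany : (((pvAct grid).map (fun r : Nat => (r : Int))).any (fun r =>
          PySem.List.pyGetD ((List.range (grid.length / 2)).map
            (fun r => (pvMc grid r).map (fun c : Nat => (c : Int)))) r []
          != ((List.range' q0.2 (q1.2 + 1 - q0.2)).map (fun k : Nat => (k : Int)))) = false)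
          ↔ (∀ r ∈ pvAct grid, pvMc grid r = List.range' q0.2 (q1.2 + 1 - q0.2)) := by
        rw [List.any_map, List.any_eq_false]
        constructor
        · intro h r hr
          have hthis := h r hr
          simp only [Function.comp_def] at hthis
          rw [PySem.List.pyGetD_natCast, PySem.List.getD_map_range _ _ _ _ (pv_mem_pvAct.mp hr).1,
            pv_bne_list] at hthis
          exact hcastinj (by simpa using hthis)
        · intro h r hr
          simp only [Function.comp_def]
          rw [PySem.List.pyGetD_natCast, PySem.List.getD_map_range _ _ _ _ (pv_mem_pvAct.mp hr).1,
            pv_bne_list, h r hr]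
          simp
      by_cases hcontig : pvAct grid = List.range' ((pvAct grid).getD 0 0)
          ((pvAct grid).getD ((pvAct grid).length - 1) 0 + 1 - (pvAct grid).getD 0 0)
      · by_cases hfull : ∀ r ∈ pvAct grid, pvMc grid r = List.range' q0.2 (q1.2 + 1 - q0.2)
        · have hfill := hFI.mpr ⟨hcontig, hfull⟩
          have hcnt := hCF.mpr hfill
          rw [if_neg (not_not_intro (show ((pvMN grid).length : Int) = _ by exact_mod_cast hcnt)),
            if_neg (not_not_intro (congrArg (List.map (fun r : Nat => (r : Int))) hcontig)),
            if_neg (by rw [hany.mpr hfull]; simp)]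
          rw [PySem.List.foldl_append_singleton_eq_map, List.nil_append]
          conv_rhs => rw [← List.map_reverse, hcontig, List.reverse_range']
          simp only [PySem.List.pyRange_zero_natCast, List.map_map]
          refine congrArg some (List.ext_getElem ?_ ?_)
          · simp
          · intro k hk1 hk2
            have hk : k < (pvAct grid).getD ((pvAct grid).length - 1) 0 + 1 - (pvAct grid).getD 0 0 := by
              simpa using hk1
            simp only [List.getElem_map, List.getElem_range, Function.comp_def]
            have h4 := (pv_mem_pvAct.mp hrmin_mem).1
            have h3 : grid.length / 2 ≤ grid.length := Nat.div_le_self _ 2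
            have hidxA : ((grid.length : Int) - 1 -
                (((grid.length - 1 - (pvAct grid).getD ((pvAct grid).length - 1) 0 : Nat) : Int) + ((k : Nat) : Int)))
                = (((pvAct grid).getD ((pvAct grid).length - 1) 0 - k : Nat) : Int) := by
              omega
            have hidxB : (pvAct grid).getD 0 0 +
                ((pvAct grid).getD ((pvAct grid).length - 1) 0 + 1 - (pvAct grid).getD 0 0) - 1 - k
                = (pvAct grid).getD ((pvAct grid).length - 1) 0 - k := by
              omega
            simp only [hidxA, hidxB, PySem.List.pyGetD_natCast]
            rw [show (((q1.2 : Nat) : Int) + 1) = ((q1.2 + 1 : Nat) : Int) by push_cast; ring,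
              PySem.List.slice_natCast]
            have hW : q1.2 < (grid.getD 0 []).length := pv_mc_lt_W (pv_mem_pvMN.mp hq1).2
            have hrowlen : (grid.getD 0 []).length
                ≤ (grid.getD ((pvAct grid).getD ((pvAct grid).length - 1) 0 - k) []).length := by
              have := hrows ((pvAct grid).getD ((pvAct grid).length - 1) 0 - k)
                (by omega) (Or.inl (by omega))
              rwa [hhead] at this
            rw [pv_take_drop_eq_map _ q0.2 (q1.2 + 1 - q0.2) (by omega)]
            refine List.map_congr_left ?_
            intro j _
            rw [show (((q0.2 : Nat) : Int) + ((j : Nat) : Int)) = ((q0.2 + j : Nat) : Int) by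
              push_cast; ring, PySem.List.pyGetD_natCast]
        · have hcnt : ¬((pvMN grid).length
              = ((pvAct grid).getD ((pvAct grid).length - 1) 0 + 1 - (pvAct grid).getD 0 0)
                * (q1.2 + 1 - q0.2)) :=
            fun heq => hfull ((hFI.mp (hCF.mp heq)).2)
          have hanyT : (((pvAct grid).map (fun r : Nat => (r : Int))).any (fun r =>
              PySem.List.pyGetD ((List.range (grid.length / 2)).map
                (fun r => (pvMc grid r).map (fun c : Nat => (c : Int)))) r []
              != ((List.range' q0.2 (q1.2 + 1 - q0.2)).map (fun k : Nat => (k : Int))))) = true := by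
            cases h : (((pvAct grid).map (fun r : Nat => (r : Int))).any (fun r =>
              PySem.List.pyGetD ((List.range (grid.length / 2)).map
                (fun r => (pvMc grid r).map (fun c : Nat => (c : Int)))) r []
              != ((List.range' q0.2 (q1.2 + 1 - q0.2)).map (fun k : Nat => (k : Int))))) with
            | false => exact absurd (hany.mp h) hfull
            | true => rfl
          rw [if_pos (show ((pvMN grid).length : Int) ≠ _ from
              fun h => hcnt (by exact_mod_cast h)),
            if_neg (not_not_intro (congrArg (List.map (fun r : Nat => (r : Int))) hcontig)),
            if_pos hanyT]
      · have hcnt : ¬((pvMN grid).length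
            = ((pvAct grid).getD ((pvAct grid).length - 1) 0 + 1 - (pvAct grid).getD 0 0)
              * (q1.2 + 1 - q0.2)) :=
          fun heq => hcontig ((hFI.mp (hCF.mp heq)).1)
        rw [if_pos (show ((pvMN grid).length : Int) ≠ _ from
            fun h => hcnt (by exact_mod_cast h)),
          if_pos (show ((pvAct grid).map (fun r : Nat => (r : Int))
              ≠ (List.range' ((pvAct grid).getD 0 0)
                ((pvAct grid).getD ((pvAct grid).length - 1) 0 + 1 - (pvAct grid).getD 0 0)).map
                (fun k : Nat => (k : Int))) from fun h => hcontig (hcastinj h))]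

-- ===== VERDICT (by name: the statement is the Claim_ definition above) =====
theorem check_vertical_painted_bottom_spec : Claim_equal_check_vertical_painted_bottom := by
  intro grid _ hpre
  unfold Spec_check_vertical_painted_bottom
  exact pv_main grid hpre
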